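-- PySemCore.lean, part 6 of 8 (source lines 1896-2102 of 3059): Set: Python 'set' as the list of its elements in first-insertion order; lawfulness; set() then update, membership after an add loop; List.dedup.
-- An excerpt: the file's own header and imports are repeated below, the enclosing namespaces are reopened, and the other parts are separate documents.
import Lean.Meta.Tactic.Simp.RegisterCommand
/-
PySem — Python-exact primitives for the program-equivalence environment (pv_equiv).

A Lean port of a Python function should compute what the Python computes on every
admitted input. Ports diverge from their Python almost always at a dozen built-ins
(negative indexing, slicing, // and % with a negative divisor, dict overwrite order,
int() parsing, stable sort, min/max ties, the whitespace/digit/case sets of str), not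
in the algorithm. This module implements exactly those built-ins with CPython's
semantics (reference: CPython 3.13), so a port can call them instead of re-inventing
them. Where Python RAISES, the primitive returns `Option` (none = the exception) and a
decidable side condition in `PySem.Raise` names the inputs on which it does not, for
the port's `Pre_`.

Core Lean plus one Lean-frontend module for the `pysem` simp-set registration (no Mathlib import): it compiles in about a minute wherever the grader runs.
Every definition is computable; the `@[simp]` lemmas and the bridge lemmas reduce the
primitives to the usual List/Int/String functions under the side condition that makes
them agree, so proofs about honest ports stay in familiar territory. String functions
are exact on the environment's stated input domain (printable ASCII); outside it the
Unicode tables are not modelled in this version.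

GRADER CODE: kernel-checked, differentially tested against CPython (tests/), trusted.
-/

/-- The `pysem` simp set: every PySem lemma (tagged at the end of PySem.lean — an attribute cannot be used in the module that
registers it), so `simp only [pysem]` / `simp [pysem, …]` tries the whole prelude book without the author knowing each name.
(This import is the one non-core dependency of this file; it costs ≈50 s of compile per container — a third tiny module would
avoid it and is the planned refinement.) -/
register_simp_attr pysem

namespace PySem

/-! ## Set — Python 'set' as the list of its elements in FIRST-INSERTION order, without duplicates (lemma pack 3).
EXACT AS SETS: membership, add, discard/remove?, len, | (union) & (inter) - (diff) ^ (symmDiff), issubset/issuperset/isdisjoint,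
== (Set.equal — NOT '=' / '==', which compare the underlying lists order-sensitively) and set(xs) (Set.ofList). A Set value must be
BUILT by empty/ofList/add/update/union/inter/diff/symmDiff/discard: a plain list with duplicates is not set(xs) — write Set.ofList xs.
NOT MODELLED: Python's ITERATION order over a set (hash order). The order here (first insertion) is a model choice, so a port may consume
a Set's elements only where the result cannot depend on their order: sum / any / all, min / max / sorted WITHOUT a key (or with a key that
is injective on the set), membership tests, building another Set, or a Dict that is afterwards only looked up. NOT exact — do not port
through a Set's order: list(s), [f(x) for x in s], 'for x in s: out.append(…)' / '"".join(s)' / break-on-first-hit, s.pop(), next(iter(s)),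
enumerate(s), zip(s, …), returning a dict built by iterating s, sorted(s, key=k) with ties under k. If the Python's RESULT depends on set
order, the Python itself is hash-order dependent: say so (NOT_PORTABLE) rather than silently using this order.
The type is 'List α' itself (an abbreviation): a Set is returned where a signature says List T, '∈' and the List lemmas apply, 'decide'
evaluates it. On a value TYPED 'List T' dot-notation finds core/Mathlib List functions, not these (xs.insert PREPENDS, xs.union /
xs.dedup differ) — write 'PySem.Set.add s x', 'PySem.Set.ofList xs', or type the value 'PySem.Set T'. -/
abbrev Set (α : Type) := _root_.List α

namespace Set

variable {α : Type} [BEq α]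

/-- 'set()'. -/
def empty : Set α := []
/-- 'x in s'. -/
def contains (s : Set α) (x : α) : Bool := _root_.List.contains s x
/-- 's.add(x)': no-op if present, else x becomes the newest element. -/
def add (s : Set α) (x : α) : Set α := if s.contains x then s else s ++ [x]
/-- 'set(xs)' / '{… for x in xs}' / also 'list(dict.fromkeys(xs))': first occurrences, in order. -/
def ofList (xs : _root_.List α) : Set α := xs.foldl add empty
/-- 's.update(xs)' / 's |= set(xs)'. -/
def update (s : Set α) (xs : _root_.List α) : Set α := xs.foldl add s
/-- 's | t'. -/
def union (s t : Set α) : Set α := update s t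
/-- 's & t' (elements of s that are in t, in s's order). -/
def inter (s t : Set α) : Set α := s.filter (fun x => t.contains x)
/-- 's - t'. -/
def diff (s t : Set α) : Set α := s.filter (fun x => !t.contains x)
/-- 's.discard(x)' (absent x: unchanged). -/
def discard (s : Set α) (x : α) : Set α := s.filter (fun y => !(y == x))
/-- 's.remove(x)': none = KeyError when x is absent. -/
def remove? (s : Set α) (x : α) : Option (Set α) := if s.contains x then some (discard s x) else none
/-- 's <= t' / 's.issubset(t)'. -/
def issubset (s t : Set α) : Bool := s.all (fun x => t.contains x)
/-- 's ^ t' (symmetric difference: s's survivors, then t's). -/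
def symmDiff (s t : Set α) : Set α := diff s t ++ diff t s
/-- 's >= t' / 's.issuperset(t)'. -/
def issuperset (s t : Set α) : Bool := issubset t s
/-- 's == t' as SETS (same members). '=' / '==' on Set compare the element LISTS and are order-sensitive — not Python's ==. -/
def equal (s t : Set α) : Bool := issubset s t && issubset t s
/-- 's.isdisjoint(t)'. -/
def isdisjoint (s t : Set α) : Bool := !s.any (fun x => t.contains x)
/-- 'len(s)' as an Int. -/
def len (s : Set α) : _root_.Int := s.length

omit [BEq α] in @[simp] theorem empty_eq : (empty : Set α) = [] := rfl
omit [BEq α] in @[simp] theorem len_eq (s : Set α) : len s = s.length := rfl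
theorem ofList_eq_foldl (xs : _root_.List α) : ofList xs = xs.foldl add [] := rfl
@[simp] theorem ofList_nil : ofList ([] : _root_.List α) = [] := rfl
theorem update_eq_foldl (s : Set α) (xs : _root_.List α) : update s xs = xs.foldl add s := rfl
theorem union_eq_update (s t : Set α) : union s t = update s t := rfl
@[simp] theorem update_nil (s : Set α) : update s [] = s := rfl
@[simp] theorem update_cons (s : Set α) (x : α) (xs : _root_.List α) : update s (x :: xs) = update (add s x) xs := rfl
theorem update_append (s : Set α) (xs ys : _root_.List α) : update s (xs ++ ys) = update (update s xs) ys := by simp [update]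
/-- set(xs) one element at a time from the RIGHT (the induction-friendly form for 'xs ++ [x]'). -/
theorem ofList_append_singleton (xs : _root_.List α) (x : α) : ofList (xs ++ [x]) = add (ofList xs) x := by simp [ofList, add]
theorem ofList_append (xs ys : _root_.List α) : ofList (xs ++ ys) = update (ofList xs) ys := by simp [ofList, update]

section Lawful
variable [LawfulBEq α]

omit [LawfulBEq α] in @[simp] theorem contains_eq_listContains (s : Set α) (x : α) : contains s x = _root_.List.contains s x := rfl
theorem contains_iff (s : Set α) (x : α) : contains s x = true ↔ x ∈ s := by simp
theorem contains_eq_decide [DecidableEq α] (s : Set α) (x : α) : contains s x = decide (x ∈ s) := by simp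
/-- s.add(x) spelled with '∈' (how a hand port writes it). -/
theorem add_eq_ite (s : Set α) (x : α) : add s x = if x ∈ s then s else s ++ [x] := by simp [add]
@[simp] theorem add_of_mem {s : Set α} {x : α} (h : x ∈ s) : add s x = s := by simp [add, h]
@[simp] theorem add_of_not_mem {s : Set α} {x : α} (h : x ∉ s) : add s x = s ++ [x] := by simp [add, h]
@[simp] theorem mem_add (s : Set α) (x y : α) : y ∈ add s x ↔ y ∈ s ∨ y = x := by
  by_cases h : x ∈ s
  · simp [h]; intro e; exact e ▸ h
  · simp [h]
theorem nodup_add (s : Set α) (x : α) (h : s.Nodup) : (add s x).Nodup := by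
  by_cases hx : x ∈ s
  · simpa [hx]
  · rw [add_of_not_mem hx, _root_.List.nodup_append]
    refine ⟨h, by simp, ?_⟩
    intro a ha b hb; simp at hb; subst hb; intro hab; subst hab; exact hx ha
@[simp] theorem mem_update (s : Set α) (xs : _root_.List α) (y : α) : y ∈ update s xs ↔ y ∈ s ∨ y ∈ xs := by
  induction xs generalizing s with
  | nil => simp
  | cons x t ih => simp [ih, or_assoc]
theorem nodup_update (s : Set α) (xs : _root_.List α) (h : s.Nodup) : (update s xs).Nodup := by
  induction xs generalizing s with
  | nil => simpa
  | cons x t ih => exact ih _ (nodup_add s x h)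
/-- set(xs) has exactly the members of xs, once each. -/
@[simp] theorem mem_ofList (xs : _root_.List α) (y : α) : y ∈ ofList xs ↔ y ∈ xs := by simp [ofList, ← update_eq_foldl]
@[simp] theorem nodup_ofList (xs : _root_.List α) : (ofList xs).Nodup := by rw [ofList, ← update_eq_foldl]; exact nodup_update _ _ _root_.List.nodup_nil
@[simp] theorem mem_union (s t : Set α) (y : α) : y ∈ union s t ↔ y ∈ s ∨ y ∈ t := mem_update s t y
theorem nodup_union (s t : Set α) (h : s.Nodup) : (union s t).Nodup := nodup_update s t h
@[simp] theorem mem_inter (s t : Set α) (y : α) : y ∈ inter s t ↔ y ∈ s ∧ y ∈ t := by simp [inter, contains]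
@[simp] theorem mem_diff (s t : Set α) (y : α) : y ∈ diff s t ↔ y ∈ s ∧ y ∉ t := by simp [diff, contains]
@[simp] theorem mem_discard (s : Set α) (x y : α) : y ∈ discard s x ↔ y ∈ s ∧ y ≠ x := by simp [discard]
omit [LawfulBEq α] in theorem nodup_inter (s t : Set α) (h : s.Nodup) : (inter s t).Nodup := h.filter _
omit [LawfulBEq α] in theorem nodup_diff (s t : Set α) (h : s.Nodup) : (diff s t).Nodup := h.filter _
omit [LawfulBEq α] in theorem nodup_discard (s : Set α) (x : α) (h : s.Nodup) : (discard s x).Nodup := h.filter _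
theorem remove?_eq_none_iff (s : Set α) (x : α) : remove? s x = none ↔ x ∉ s := by simp [remove?, contains]
theorem remove?_of_mem {s : Set α} {x : α} (h : x ∈ s) : remove? s x = some (discard s x) := by simp [remove?, contains, h]
@[simp] theorem issubset_iff (s t : Set α) : issubset s t = true ↔ ∀ x ∈ s, x ∈ t := by simp [issubset, contains]
@[simp] theorem issuperset_iff (s t : Set α) : issuperset s t = true ↔ ∀ x ∈ t, x ∈ s := by simp [issuperset]
/-- Python's s == t: the same members (for proofs: two Nodup lists with the same members are List.Perm — Mathlib's List.perm_ext_iff_of_nodup). -/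
@[simp] theorem equal_iff (s t : Set α) : equal s t = true ↔ ∀ x, x ∈ s ↔ x ∈ t := by
  simp only [equal, Bool.and_eq_true, issubset_iff]
  exact ⟨fun ⟨h1, h2⟩ x => ⟨h1 x, h2 x⟩, fun h => ⟨fun x hx => (h x).mp hx, fun x hx => (h x).mpr hx⟩⟩
@[simp] theorem mem_symmDiff (s t : Set α) (y : α) : y ∈ symmDiff s t ↔ (y ∈ s ∧ y ∉ t) ∨ (y ∈ t ∧ y ∉ s) := by simp [symmDiff]
theorem nodup_symmDiff (s t : Set α) (hs : s.Nodup) (ht : t.Nodup) : (symmDiff s t).Nodup := by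
  rw [symmDiff, _root_.List.nodup_append]
  refine ⟨nodup_diff s t hs, nodup_diff t s ht, ?_⟩
  intro a ha b hb hab; subst hab; rw [mem_diff] at ha hb; exact ha.2 hb.1
@[simp] theorem isdisjoint_iff (s t : Set α) : isdisjoint s t = true ↔ ∀ x ∈ s, x ∉ t := by simp [isdisjoint, contains]
/-- adding fresh, distinct elements appends them. -/
theorem update_eq_append_of_disjoint (s : Set α) (xs : _root_.List α) (hn : xs.Nodup) (hd : ∀ x ∈ xs, x ∉ s) : update s xs = s ++ xs := by
  induction xs generalizing s with
  | nil => simp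
  | cons x t ih =>
    rw [_root_.List.nodup_cons] at hn
    rw [update_cons, add_of_not_mem (hd x _root_.List.mem_cons_self), ih _ hn.2]
    · simp
    · intro y hy hm; rcases _root_.List.mem_append.mp hm with h | h
      · exact hd y (_root_.List.mem_cons_of_mem _ hy) h
      · simp at h; exact hn.1 (h ▸ hy)
theorem ofList_cons_eq_update (y : α) (ys : _root_.List α) : ofList (y :: ys) = update [y] ys := by
  simp [ofList, update_eq_foldl, add]
/-- s.update(xs) is s followed by the NEW elements of xs (first occurrences, in order). -/
theorem update_eq_append_filter (s : Set α) (xs : _root_.List α) : update s xs = s ++ (ofList xs).filter (fun y => !(contains s y)) := by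
  induction xs generalizing s with
  | nil => simp
  | cons y ys ih =>
    rw [update_cons, ih (add s y), ofList_cons_eq_update, ih [y]]
    by_cases hy : y ∈ s
    · rw [add_of_mem hy]
      have h1 : (contains s y) = true := (contains_iff s y).mpr hy
      simp only [_root_.List.cons_append, _root_.List.nil_append, _root_.List.filter_cons, h1, Bool.not_true, Bool.false_eq_true,
        ↓reduceIte, _root_.List.filter_filter]
      congr 1
      apply _root_.List.filter_congr; intro z hz
      by_cases hzy : z = y
      · subst hzy; simp [hy]
      · have : (contains [z] y) = false := by simpa [contains] using fun h => hzy h.symm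
        simp [contains, hzy]
    · rw [add_of_not_mem hy]
      have h1 : (contains s y) = false := by simpa [contains] using hy
      simp only [_root_.List.cons_append, _root_.List.nil_append, _root_.List.filter_cons, h1, Bool.not_false, ↓reduceIte,
        _root_.List.filter_filter, _root_.List.append_assoc]
      congr 1; congr 1
      apply _root_.List.filter_congr; intro z hz
      by_cases hzy : z = y
      · subst hzy; simp [contains]
      · simp [contains, hzy]
/-- set(x :: xs) from the LEFT (for 'induction xs'): x first, then set(xs) without x. -/
theorem ofList_cons (x : α) (xs : _root_.List α) : ofList (x :: xs) = x :: discard (ofList xs) x := by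
  rw [ofList_cons_eq_update, update_eq_append_filter]; simp only [_root_.List.singleton_append, discard]
  congr 1; apply _root_.List.filter_congr; intro z _; simp [contains]
/-- a duplicate-free list is its own set (e.g. set(range(n))). -/
theorem ofList_eq_self_of_nodup (xs : _root_.List α) (h : xs.Nodup) : ofList xs = xs := by
  rw [ofList, ← update_eq_foldl, update_eq_append_of_disjoint _ xs h (by simp)]; rfl
@[simp] theorem ofList_ofList (xs : _root_.List α) : ofList (ofList xs) = ofList xs := ofList_eq_self_of_nodup _ (nodup_ofList xs)
omit [LawfulBEq α] in theorem length_ofList_le (xs : _root_.List α) : (ofList xs).length ≤ xs.length := by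
  suffices h : ∀ (s : Set α), (update s xs).length ≤ s.length + xs.length by simpa [ofList, ← update_eq_foldl] using h []
  induction xs with
  | nil => simp
  | cons x t ih => intro s; rw [update_cons]; refine Nat.le_trans (ih _) ?_; unfold add; split <;> simp <;> omega
end Lawful

/-! ### Lemma pack 4 — set() then update, membership after an add loop -/
/-- 's = set(); s.update(xs)' is set(xs). -/
theorem update_empty (xs : _root_.List α) : update empty xs = ofList xs := rfl
theorem update_nil_left (xs : _root_.List α) : update ([] : Set α) xs = ofList xs := rfl
/-- membership after a loop of s.add(f(b)). -/
theorem mem_foldl_add [LawfulBEq α] {β : Type} (l : _root_.List β) (f : β → α) (s : Set α) (y : α) :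
    y ∈ l.foldl (fun s b => add s (f b)) s ↔ y ∈ s ∨ ∃ b ∈ l, y = f b := by
  induction l generalizing s with
  | nil => simp
  | cons b t ih =>
    simp only [_root_.List.foldl_cons, ih, mem_add, _root_.List.mem_cons]
    constructor
    · rintro ((h | rfl) | ⟨c, hc, rfl⟩)
      · exact Or.inl h
      · exact Or.inr ⟨b, Or.inl rfl, rfl⟩
      · exact Or.inr ⟨c, Or.inr hc, rfl⟩
    · rintro (h | ⟨c, (rfl | hc), rfl⟩)
      · exact Or.inl (Or.inl h)
      · exact Or.inl (Or.inr rfl)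
      · exact Or.inr ⟨c, hc, rfl⟩
/-- s.update(map f l) IS the loop 'for b in l: s.add(f(b))' ('rw [← PySem.Set.update_map_eq_foldl_add]' turns the loop into an update, where mem_update / nodup_update / update_eq_append_… apply). -/
theorem update_map_eq_foldl_add {β : Type} (l : _root_.List β) (f : β → α) (s : Set α) : update s (l.map f) = l.foldl (fun s b => add s (f b)) s := by
  simp [update, _root_.List.foldl_map]
end Set

namespace List
/-- Python 'list(dict.fromkeys(xs))' / the element order of 'set(xs)' here: FIRST occurrences kept, in order (= PySem.Set.ofList).
Always write 'PySem.List.dedup xs' / 'PySem.Set.ofList xs': dot-notation 'xs.dedup' is Mathlib's List.dedup, a DIFFERENT function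
(it keeps LAST occurrences: [1,2,1].dedup = [2,1], whereas dict.fromkeys gives [1,2]). -/
def dedup {α : Type} [BEq α] (xs : _root_.List α) : _root_.List α := Set.ofList xs
@[simp] theorem dedup_eq_ofList {α : Type} [BEq α] (xs : _root_.List α) : dedup xs = Set.ofList xs := rfl
theorem mem_dedup {α : Type} [BEq α] [LawfulBEq α] (xs : _root_.List α) (x : α) : x ∈ dedup xs ↔ x ∈ xs := Set.mem_ofList xs x
theorem nodup_dedup {α : Type} [BEq α] [LawfulBEq α] (xs : _root_.List α) : (dedup xs).Nodup := Set.nodup_ofList xs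
end List

end PySem
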